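-- pv_equiv track=rewrite | github.com/themagickingsman/cosmic_compass | BINARY_TRANSLATION_ENGINE.py | _calculate_character_spacings
-- ===== SOURCE A (Python) =====
-- from typing import Dict, List, Tuple, Optional, Set
-- from collections import Counter, defaultdict
--
-- def _calculate_character_spacings(text: str) -> List[int]:
--     """Calculate spacing between repeated characters"""
--     positions = defaultdict(list)
--     for i, char in enumerate(text):
--         positions[char].append(i)
--
--     spacings = []
--     for char_positions in positions.values():
--         if len(char_positions) >= 2:
--             for i in range(len(char_positions) - 1):
--                 spacings.append(char_positions[i+1] - char_positions[i])
--
--     return spacings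
-- ===== SOURCE B (Python) =====
-- def _calculate_character_spacings(text: str) -> list:
--     """Single pass: per character keep (last index, gaps collected so far)."""
--     state = {}
--     for i, ch in enumerate(text):
--         if ch in state:
--             last, gaps = state[ch]
--             gaps.append(i - last)
--             state[ch] = (i, gaps)
--         else:
--             state[ch] = (i, [])
--     out = []
--     for _last, gaps in state.values():
--         out += gaps
--     return out
-- ===== Notes on version B (the rewrite author's own statement) =====
-- stated objective: alternative
-- what changed: A first groups all positions per character into a defaultdict and then runs a second indexed pass diffing each position list; B fuses this into a single incremental pass that keeps only each character's last index and its gaps collected so far, flattening the per-character gap lists at the end.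
import Mathlib
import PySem

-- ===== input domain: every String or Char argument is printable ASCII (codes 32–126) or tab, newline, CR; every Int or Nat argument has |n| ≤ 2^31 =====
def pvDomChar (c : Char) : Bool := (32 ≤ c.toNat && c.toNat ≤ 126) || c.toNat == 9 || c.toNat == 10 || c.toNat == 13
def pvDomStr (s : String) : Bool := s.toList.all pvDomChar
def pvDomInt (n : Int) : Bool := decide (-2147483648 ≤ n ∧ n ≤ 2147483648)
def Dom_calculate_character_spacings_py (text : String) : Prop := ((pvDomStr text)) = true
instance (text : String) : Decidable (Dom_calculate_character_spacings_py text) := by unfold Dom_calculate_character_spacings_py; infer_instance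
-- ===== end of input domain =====

-- B fuses A's two phases (group all positions per char, then diff each group) into one
-- incremental pass keeping only each char's last index and its gaps so far (objective: alternative).

-- ===== PORT A =====
def calculate_character_spacings_py (text : String) : List Int :=
  (((PySem.List.enumerate text.toList 0).foldl
      (fun d p => d.modify p.2 [] (fun v => v ++ [p.1]))
      (PySem.Dict.empty : PySem.Dict Char (List Int))).values).foldl
    (fun spacings cp =>
      if 2 ≤ cp.length then
        (PySem.List.pyRange 0 ((cp.length : Int) - 1) 1).foldl
          (fun acc i => acc ++ [PySem.List.pyGetD cp (i + 1) 0 - PySem.List.pyGetD cp i 0]) spacings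
      else spacings) []

-- ===== PORT B =====
def calculate_character_spacings_py_alt (text : String) : List Int :=
  (((PySem.List.enumerate text.toList 0).foldl
      (fun d p => d.insert p.2
        (match d.get? p.2 with
         | none => (p.1, ([] : List Int))
         | some t => (p.1, t.2 ++ [p.1 - t.1])))
      (PySem.Dict.empty : PySem.Dict Char (Int × List Int))).values).foldl
    (fun out pr => out ++ pr.2) []

-- ===== PRECONDITION & SPEC =====
def Spec_calculate_character_spacings_py (text : String) (out : List Int) : Prop := out = calculate_character_spacings_py_alt text
instance (text : String) (out : List Int) : Decidable (Spec_calculate_character_spacings_py text out) := by unfold Spec_calculate_character_spacings_py; infer_instance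

-- ===== CLAIM (what is proved, stated in full; the proofs are below) =====
def Claim_equal_calculate_character_spacings_py : Prop := ∀ (text : String), Dom_calculate_character_spacings_py text → Spec_calculate_character_spacings_py text (calculate_character_spacings_py text)

-- ===== LEMMAS AND PROOFS =====

-- adjacent gaps of a position list
def pvAdj (l : List Int) : List Int := List.zipWith (fun b a => b - a) l.tail l

-- positions of character c in cs
def pvPos (cs : List Char) (c : Char) : List Int :=
  ((PySem.List.enumerate cs 0).filter (fun p => p.2 == c)).map (fun p => p.1)

-- B's per-character incremental step
def pvStep1 (s : Option (Int × List Int)) (i : Int) : Option (Int × List Int) :=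
  match s with
  | none => some (i, [])
  | some t => some (i, t.2 ++ [i - t.1])

lemma pvAdj_map_range (l : List Int) :
    (List.range (l.length - 1)).map (fun k => l.getD (k + 1) 0 - l.getD k 0) = pvAdj l := by
  apply List.ext_getElem
  · simp only [pvAdj, List.length_map, List.length_range, List.length_zipWith, List.length_tail]
    omega
  · intro j h1 h2
    simp only [List.getElem_map, List.getElem_range, pvAdj, List.getElem_zipWith]
    simp only [List.length_map, List.length_range] at h1
    rw [List.getD_eq_getElem l 0 (by omega), List.getD_eq_getElem l 0 (by omega)]
    congr 1
    cases l with
    | nil => simp at h1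
    | cons x xs => simp

lemma pvAdj_map_pyRange (l : List Int) :
    (PySem.List.pyRange 0 ((l.length : Int) - 1) 1).map
      (fun i => PySem.List.pyGetD l (i + 1) 0 - PySem.List.pyGetD l i 0) = pvAdj l := by
  have hr : PySem.List.pyRange 0 ((l.length : Int) - 1) 1
      = (List.range (l.length - 1)).map (fun k : Nat => (k : Int)) := by
    cases l with
    | nil => simp [PySem.List.pyRange_one_eq_nil (by norm_num : (-1 : Int) ≤ 0)]
    | cons x xs =>
      have : ((x :: xs).length : Int) - 1 = ((xs.length : Nat) : Int) := by
        push_cast [List.length_cons]; ring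
      rw [this, PySem.List.pyRange_zero_natCast]
      rfl
  rw [hr, List.map_map, ← pvAdj_map_range l]
  apply List.map_congr_left
  intro k _
  simp only [Function.comp]
  have h1 : ((k : Int) + 1) = ((k + 1 : Nat) : Int) := by push_cast; ring
  rw [h1, PySem.List.pyGetD_natCast, PySem.List.pyGetD_natCast]

lemma pvA_inner (l : List Int) (acc : List Int) :
    (if 2 ≤ l.length then
        (PySem.List.pyRange 0 ((l.length : Int) - 1) 1).foldl
          (fun acc i => acc ++ [PySem.List.pyGetD l (i + 1) 0 - PySem.List.pyGetD l i 0]) acc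
      else acc) = acc ++ pvAdj l := by
  split_ifs with h
  · rw [PySem.List.foldl_append_singleton_eq_map
      (fun i => PySem.List.pyGetD l (i + 1) 0 - PySem.List.pyGetD l i 0) _ acc,
      pvAdj_map_pyRange]
  · match l, h with
    | [], _ => simp [pvAdj]
    | [x], _ => simp [pvAdj]
    | x :: y :: t, h => exact absurd (by simp only [List.length_cons]; omega) h

lemma pvB_get? (l : List (Int × Char)) (d : PySem.Dict Char (Int × List Int)) (c : Char) :
    (l.foldl (fun d p => d.insert p.2
        (match d.get? p.2 with
         | none => (p.1, ([] : List Int))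
         | some t => (p.1, t.2 ++ [p.1 - t.1]))) d).get? c =
      ((l.filter (fun p => p.2 == c)).map (fun p => p.1)).foldl pvStep1 (d.get? c) := by
  induction l generalizing d with
  | nil => rfl
  | cons p rest ih =>
    simp only [List.foldl_cons, ih, List.filter_cons]
    by_cases h : p.2 = c
    · subst h
      simp [PySem.Dict.get?_insert_self, pvStep1]
      cases d.get? p.2 <;> rfl
    · have h' : ¬ (c = p.2) := fun e => h e.symm
      rw [PySem.Dict.get?_insert]
      simp [h, h']

lemma pvStep1_run (ps : List Int) (i : Int) (g : List Int) :
    ps.foldl pvStep1 (some (i, g)) =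
      some (ps.getLastD i, g ++ List.zipWith (fun b a => b - a) ps (i :: ps)) := by
  induction ps generalizing i g with
  | nil => simp
  | cons p rest ih =>
    simp only [List.foldl_cons, pvStep1, ih, List.zipWith, List.getLastD_cons]
    simp

lemma pvPos_ne_nil {cs : List Char} {c : Char} (h : c ∈ cs) : pvPos cs c ≠ [] := by
  unfold pvPos
  intro hnil
  rw [List.map_eq_nil_iff, List.filter_eq_nil_iff] at hnil
  rw [← PySem.List.map_snd_enumerate cs 0, List.mem_map] at h
  obtain ⟨p, hp, hpc⟩ := h
  exact absurd (by simp [hpc]) (hnil p hp)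

lemma pvA_eval (text : String) :
    calculate_character_spacings_py text =
      ((PySem.Set.ofList text.toList).map (fun c => pvAdj (pvPos text.toList c))).flatten := by
  unfold calculate_character_spacings_py
  have hkeys : ((PySem.List.enumerate text.toList 0).foldl
      (fun d p => d.modify p.2 [] (fun v => v ++ [p.1]))
      (PySem.Dict.empty : PySem.Dict Char (List Int))).keys
      = PySem.Set.ofList text.toList := by
    have h := PySem.Dict.keys_foldl_modify_key (PySem.List.enumerate text.toList 0)
      (fun p => p.2) ([] : List Int)
      (fun _ p => fun v => v ++ [p.1]) PySem.Dict.empty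
    simp only [PySem.List.map_snd_enumerate] at h
    exact h
  have hnodup : ((PySem.List.enumerate text.toList 0).foldl
      (fun d p => d.modify p.2 [] (fun v => v ++ [p.1]))
      (PySem.Dict.empty : PySem.Dict Char (List Int))).keys.Nodup := by
    exact PySem.Dict.nodup_keys_foldl_modify_key (PySem.List.enumerate text.toList 0)
      (fun p => p.2) ([] : List Int)
      (fun _ p => fun v => v ++ [p.1]) PySem.Dict.empty PySem.Dict.nodup_keys_empty
  have hgetD : ∀ c, ((PySem.List.enumerate text.toList 0).foldl
      (fun d p => d.modify p.2 [] (fun v => v ++ [p.1]))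
      (PySem.Dict.empty : PySem.Dict Char (List Int))).getD c []
      = pvPos text.toList c := by
    intro c
    have h := PySem.Dict.getD_foldl_modify_append
      ((PySem.List.enumerate text.toList 0).map Prod.swap)
      (PySem.Dict.empty : PySem.Dict Char (List Int)) c
    rw [List.foldl_map, List.filter_map, List.map_map] at h
    exact h
  rw [PySem.Dict.values_eq_map_keys _ hnodup []]
  have hstep : (fun (spacings : List Int) cp =>
      if 2 ≤ cp.length then
        (PySem.List.pyRange 0 ((cp.length : Int) - 1) 1).foldl
          (fun acc i => acc ++ [PySem.List.pyGetD cp (i + 1) 0 - PySem.List.pyGetD cp i 0]) spacings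
      else spacings) = fun acc l => acc ++ pvAdj l := by
    funext acc l; exact pvA_inner l acc
  rw [hstep, PySem.List.foldl_append_eq_flatMap pvAdj, hkeys]
  simp only [List.flatMap_def, List.map_map, List.nil_append]
  congr 1
  apply List.map_congr_left
  intro c _
  simp only [Function.comp]
  rw [hgetD]

lemma pvB_eval (text : String) :
    calculate_character_spacings_py_alt text =
      ((PySem.Set.ofList text.toList).map (fun c =>
        (((PySem.List.enumerate text.toList 0).foldl
          (fun d p => d.insert p.2
            (match d.get? p.2 with
             | none => (p.1, ([] : List Int))
             | some t => (p.1, t.2 ++ [p.1 - t.1])))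
          (PySem.Dict.empty : PySem.Dict Char (Int × List Int))).getD c (0, [])).2)).flatten := by
  unfold calculate_character_spacings_py_alt
  have hkeys : ((PySem.List.enumerate text.toList 0).foldl
      (fun d p => d.insert p.2
        (match d.get? p.2 with
         | none => (p.1, ([] : List Int))
         | some t => (p.1, t.2 ++ [p.1 - t.1])))
      (PySem.Dict.empty : PySem.Dict Char (Int × List Int))).keys
      = PySem.Set.ofList text.toList := by
    have h := PySem.Dict.keys_foldl_insert_key (PySem.List.enumerate text.toList 0)
      (fun p => p.2)
      (fun d p => (match d.get? p.2 with
         | none => (p.1, ([] : List Int))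
         | some t => (p.1, t.2 ++ [p.1 - t.1]))) PySem.Dict.empty
    simp only [PySem.List.map_snd_enumerate] at h
    exact h
  have hnodup : ((PySem.List.enumerate text.toList 0).foldl
      (fun d p => d.insert p.2
        (match d.get? p.2 with
         | none => (p.1, ([] : List Int))
         | some t => (p.1, t.2 ++ [p.1 - t.1])))
      (PySem.Dict.empty : PySem.Dict Char (Int × List Int))).keys.Nodup := by
    exact PySem.Dict.nodup_keys_foldl_insert_key (PySem.List.enumerate text.toList 0)
      (fun p => p.2)
      (fun d p => (match d.get? p.2 with
         | none => (p.1, ([] : List Int))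
         | some t => (p.1, t.2 ++ [p.1 - t.1]))) PySem.Dict.empty PySem.Dict.nodup_keys_empty
  rw [PySem.Dict.values_eq_map_keys _ hnodup (0, []),
    PySem.List.foldl_append_eq_flatMap (fun (pr : Int × List Int) => pr.2), hkeys]
  simp only [List.flatMap_def, List.map_map, List.nil_append]
  rfl

-- ===== VERDICT (by name: the statement is the Claim_ definition above) =====
theorem calculate_character_spacings_py_spec : Claim_equal_calculate_character_spacings_py := by
  intro text _
  unfold Spec_calculate_character_spacings_py
  rw [pvA_eval, pvB_eval]
  congr 1
  apply List.map_congr_left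
  intro c hc
  rw [PySem.Set.mem_ofList] at hc
  obtain ⟨i, ps, hpos⟩ : ∃ i ps, pvPos text.toList c = i :: ps := by
    cases h : pvPos text.toList c with
    | nil => exact absurd h (pvPos_ne_nil hc)
    | cons i ps => exact ⟨i, ps, rfl⟩
  have hget : ((PySem.List.enumerate text.toList 0).foldl
      (fun d p => d.insert p.2
        (match d.get? p.2 with
         | none => (p.1, ([] : List Int))
         | some t => (p.1, t.2 ++ [p.1 - t.1])))
      (PySem.Dict.empty : PySem.Dict Char (Int × List Int))).get? c
      = (pvPos text.toList c).foldl pvStep1 none := by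
    have h := pvB_get? (PySem.List.enumerate text.toList 0) PySem.Dict.empty c
    rw [PySem.Dict.get?_empty] at h
    exact h
  rw [PySem.Dict.getD_eq_get?_getD, hget, hpos]
  simp only [List.foldl_cons, pvStep1, pvStep1_run]
  simp [pvAdj]
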